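-- pv_equiv track=rewrite | github.com/adamgunderson/NetBrain-FireMon-Sync | lib/report.py | _analyze_license_requirements
-- ===== SOURCE A (Python) =====
-- from typing import Dict, List, Any, Optional, Union
--
-- def _analyze_license_requirements(changes: Dict[str, Any]) -> Dict[str, Any]:
--     """
--     Analyze license requirements based on changes
--
--     Args:
--         changes: Dictionary of sync changes
--
--     Returns:
--         Dictionary containing license analysis
--     """
--     return {
--         'current_licenses': {
--             'SM': sum(1 for l in changes.get('licenses', [])
--                      if l.get('product') == 'SM' and l.get('action') != 'remove'),
--             'PO': sum(1 for l in changes.get('licenses', [])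
--                      if l.get('product') == 'PO' and l.get('action') != 'remove'),
--             'PP': sum(1 for l in changes.get('licenses', [])
--                      if l.get('product') == 'PP' and l.get('action') != 'remove')
--         },
--         'required_licenses': {
--             'SM': sum(1 for d in changes.get('devices', [])
--                      if d.get('action') in ['add', 'update']),
--             'PO': sum(1 for d in changes.get('devices', [])
--                      if d.get('action') in ['add', 'update']),
--             'PP': sum(1 for d in changes.get('devices', [])
--                      if d.get('action') in ['add', 'update'])
--         },
--         'additional_needed': {
--             'SM': max(0, sum(1 for d in changes.get('devices', [])
--                             if d.get('action') in ['add', 'update']) -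
--                      sum(1 for l in changes.get('licenses', [])
--                          if l.get('product') == 'SM' and l.get('action') != 'remove')),
--             'PO': max(0, sum(1 for d in changes.get('devices', [])
--                             if d.get('action') in ['add', 'update']) -
--                      sum(1 for l in changes.get('licenses', [])
--                          if l.get('product') == 'PO' and l.get('action') != 'remove')),
--             'PP': max(0, sum(1 for d in changes.get('devices', [])
--                             if d.get('action') in ['add', 'update']) -
--                      sum(1 for l in changes.get('licenses', [])
--                          if l.get('product') == 'PP' and l.get('action') != 'remove'))
--         }
--     }
-- ===== SOURCE B (Python) =====
-- def _analyze_license_requirements(changes):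
--     devices = changes.get('devices', [])
--     licenses = changes.get('licenses', [])
--     required = sum(1 for d in devices
--                    if d.get('action') == 'add' or d.get('action') == 'update')
--     counts = {}
--     for l in licenses:
--         if l.get('action') != 'remove':
--             p = l.get('product')
--             counts[p] = counts.get(p, 0) + 1
--     products = ('SM', 'PO', 'PP')
--     current = {p: counts.get(p, 0) for p in products}
--     return {
--         'current_licenses': current,
--         'required_licenses': {p: required for p in products},
--         'additional_needed': {p: max(0, required - current[p]) for p in products},
--     }
-- ===== Notes on version B (the rewrite author's own statement) =====
-- stated objective: simpler
-- what changed: Replaces A's nine independent filtered rescans of the licenses/devices lists with one device pass computing the shared required count and one grouping pass building a product->count dictionary, from which the three tables are assembled by lookup.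
import Mathlib
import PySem

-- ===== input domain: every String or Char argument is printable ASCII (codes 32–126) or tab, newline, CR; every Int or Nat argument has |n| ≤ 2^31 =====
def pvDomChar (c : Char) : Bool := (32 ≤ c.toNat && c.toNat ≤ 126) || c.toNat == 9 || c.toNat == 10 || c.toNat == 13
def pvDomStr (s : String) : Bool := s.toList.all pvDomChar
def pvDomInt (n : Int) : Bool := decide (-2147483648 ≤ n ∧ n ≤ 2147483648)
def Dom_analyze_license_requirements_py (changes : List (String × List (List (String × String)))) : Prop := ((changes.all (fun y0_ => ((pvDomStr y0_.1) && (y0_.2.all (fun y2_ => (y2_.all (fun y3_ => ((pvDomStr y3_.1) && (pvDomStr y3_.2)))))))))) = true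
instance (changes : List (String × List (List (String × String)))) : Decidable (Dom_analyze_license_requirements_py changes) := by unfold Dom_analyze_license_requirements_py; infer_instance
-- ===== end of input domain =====

-- B is a simpler decomposition: one pass over devices and one grouping pass over licenses
-- instead of A's nine filtered rescans; return values only (neither mutates its argument).

-- d.get(k)  (inner dict, no default)
def pvGet (d : List (String × String)) (k : String) : Option String :=
  (PySem.Dict.mk d).get? k

-- changes.get(k, [])
def pvGetL (d : List (String × List (List (String × String)))) (k : String) :
    List (List (String × String)) :=
  ((PySem.Dict.mk d).get? k).getD []

-- ===== PORT A =====
-- each 'sum(1 for … if cond)' is the corresponding countP (sum_map_ite_one_zero form), recomputed in place as A does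
def analyze_license_requirements_py (changes : List (String × List (List (String × String)))) : List (String × List (String × Int)) :=
  [("current_licenses",
     [("SM", ((pvGetL changes "licenses").countP (fun l => pvGet l "product" == some "SM" && !(pvGet l "action" == some "remove")) : Int)),
      ("PO", ((pvGetL changes "licenses").countP (fun l => pvGet l "product" == some "PO" && !(pvGet l "action" == some "remove")) : Int)),
      ("PP", ((pvGetL changes "licenses").countP (fun l => pvGet l "product" == some "PP" && !(pvGet l "action" == some "remove")) : Int))]),
   ("required_licenses",
     [("SM", ((pvGetL changes "devices").countP (fun d => [some "add", some "update"].contains (pvGet d "action")) : Int)),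
      ("PO", ((pvGetL changes "devices").countP (fun d => [some "add", some "update"].contains (pvGet d "action")) : Int)),
      ("PP", ((pvGetL changes "devices").countP (fun d => [some "add", some "update"].contains (pvGet d "action")) : Int))]),
   ("additional_needed",
     [("SM", max 0 (((pvGetL changes "devices").countP (fun d => [some "add", some "update"].contains (pvGet d "action")) : Int) -
                    ((pvGetL changes "licenses").countP (fun l => pvGet l "product" == some "SM" && !(pvGet l "action" == some "remove")) : Int))),
      ("PO", max 0 (((pvGetL changes "devices").countP (fun d => [some "add", some "update"].contains (pvGet d "action")) : Int) -
                    ((pvGetL changes "licenses").countP (fun l => pvGet l "product" == some "PO" && !(pvGet l "action" == some "remove")) : Int))),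
      ("PP", max 0 (((pvGetL changes "devices").countP (fun d => [some "add", some "update"].contains (pvGet d "action")) : Int) -
                    ((pvGetL changes "licenses").countP (fun l => pvGet l "product" == some "PP" && !(pvGet l "action" == some "remove")) : Int)))])]

-- ===== PORT B =====
def analyze_license_requirements_py_alt (changes : List (String × List (List (String × String)))) : List (String × List (String × Int)) :=
  let devices := pvGetL changes "devices"
  let licenses := pvGetL changes "licenses"
  let required : Int :=
    (devices.countP (fun d => pvGet d "action" == some "add" || pvGet d "action" == some "update") : Int)
  -- the grouping loop: counts[p] = counts.get(p, 0) + 1 over non-removed licenses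
  let counts : PySem.Dict (Option String) Int :=
    licenses.foldl
      (fun cs l =>
        if !(pvGet l "action" == some "remove") then
          cs.insert (pvGet l "product") (cs.getD (pvGet l "product") 0 + 1)
        else cs)
      PySem.Dict.empty
  let cur := fun (p : String) => counts.getD (some p) 0
  [("current_licenses", [("SM", cur "SM"), ("PO", cur "PO"), ("PP", cur "PP")]),
   ("required_licenses", [("SM", required), ("PO", required), ("PP", required)]),
   ("additional_needed",
     [("SM", max 0 (required - cur "SM")),
      ("PO", max 0 (required - cur "PO")),
      ("PP", max 0 (required - cur "PP"))])]

-- ===== PRECONDITION & SPEC =====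
def Spec_analyze_license_requirements_py (changes : List (String × List (List (String × String)))) (out : List (String × List (String × Int))) : Prop := out = analyze_license_requirements_py_alt changes
instance (changes : List (String × List (List (String × String)))) (out : List (String × List (String × Int))) : Decidable (Spec_analyze_license_requirements_py changes out) := by unfold Spec_analyze_license_requirements_py; infer_instance

-- ===== CLAIM (what is proved, stated in full; the proofs are below) =====
def Claim_equal_analyze_license_requirements_py : Prop := ∀ (changes : List (String × List (List (String × String)))), Dom_analyze_license_requirements_py changes → Spec_analyze_license_requirements_py changes (analyze_license_requirements_py changes)

-- ===== LEMMAS AND PROOFS =====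

-- B's grouping loop is a conditional counter: its lookup at p is A's filtered count.
theorem cur_eq_countP (licenses : List (List (String × String))) (p : String) :
    ((licenses.foldl
       (fun cs l =>
         if !(pvGet l "action" == some "remove") then
           cs.insert (pvGet l "product") (cs.getD (pvGet l "product") 0 + 1)
         else cs)
       PySem.Dict.empty : PySem.Dict (Option String) Int).getD (some p) 0)
    = (licenses.countP (fun l => pvGet l "product" == some p && !(pvGet l "action" == some "remove")) : Int) := by
  have aux : ∀ (ls : List (List (String × String))) (cs : PySem.Dict (Option String) Int),
      ((ls.foldl
        (fun cs l =>
          if !(pvGet l "action" == some "remove") then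
            cs.insert (pvGet l "product") (cs.getD (pvGet l "product") 0 + 1)
          else cs)
        cs).getD (some p) 0)
      = cs.getD (some p) 0 + (ls.countP (fun l => pvGet l "product" == some p && !(pvGet l "action" == some "remove")) : Int) := by
    intro ls
    induction ls with
    | nil => intro cs; simp
    | cons l ls ih =>
      intro cs
      simp only [List.foldl_cons, List.countP_cons, ih]
      by_cases hr : (pvGet l "action" == some "remove") = true
      · simp [hr]
      · simp only [Bool.not_eq_true] at hr
        by_cases hp : pvGet l "product" = some p
        · simp [hr, hp]
          ring
        · have hne : (some p : Option String) ≠ pvGet l "product" := fun h => hp h.symm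
          simp [hr, PySem.Dict.getD_insert, hne, hp]
  simpa using aux licenses PySem.Dict.empty

theorem analyze_license_requirements_py_spec : Claim_equal_analyze_license_requirements_py := by
  intro changes _
  unfold Spec_analyze_license_requirements_py analyze_license_requirements_py analyze_license_requirements_py_alt
  have hdev : (fun d : List (String × String) => [some "add", some "update"].contains (pvGet d "action"))
      = (fun d : List (String × String) => pvGet d "action" == some "add" || pvGet d "action" == some "update") := by
    funext d
    simp only [List.contains_cons, List.contains_nil, Bool.or_false]
  simp only [hdev, cur_eq_countP]
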